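-- pv_equiv track=rewrite | github.com/fproks/LeetCode | pythonCode/Solution/MediumSoultion/ArraySolution.py | _allSame
-- ===== SOURCE A (Python) =====
-- from typing import List
--
-- def _allSame(grid: List[List[int]]) -> bool:
--     hasTrue = False
--     hasFalse = False
--     for i in range(len(grid)):
--         if 1 in grid[i]:
--             hasTrue = True
--         if 0 in grid[i]:
--             hasFalse = True
--         if hasTrue & hasFalse:
--             return False
--     return True
-- ===== SOURCE B (Python) =====
-- from typing import List
--
-- def _allSame(grid: List[List[int]]) -> bool:
--     if not grid:
--         return True
--
--     def scan(lo: int, hi: int):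
--         # (has0, has1) over rows lo..hi-1, by divide and conquer
--         if hi - lo == 1:
--             row = grid[lo]
--             return (0 in row, 1 in row)
--         mid = (lo + hi) // 2
--         a0, a1 = scan(lo, mid)
--         b0, b1 = scan(mid, hi)
--         return (a0 or b0, a1 or b1)
--
--     h0, h1 = scan(0, len(grid))
--     return not (h0 and h1)
-- ===== Notes on version B (the rewrite author's own statement) =====
-- stated objective: alternative
-- what changed: Replaces A's left-to-right loop carrying two flags with an early return by a divide-and-conquer recursion over the row index range that computes a (has0, has1) pair for each half and combines them with or, deciding the answer only at the top.
import Mathlib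
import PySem

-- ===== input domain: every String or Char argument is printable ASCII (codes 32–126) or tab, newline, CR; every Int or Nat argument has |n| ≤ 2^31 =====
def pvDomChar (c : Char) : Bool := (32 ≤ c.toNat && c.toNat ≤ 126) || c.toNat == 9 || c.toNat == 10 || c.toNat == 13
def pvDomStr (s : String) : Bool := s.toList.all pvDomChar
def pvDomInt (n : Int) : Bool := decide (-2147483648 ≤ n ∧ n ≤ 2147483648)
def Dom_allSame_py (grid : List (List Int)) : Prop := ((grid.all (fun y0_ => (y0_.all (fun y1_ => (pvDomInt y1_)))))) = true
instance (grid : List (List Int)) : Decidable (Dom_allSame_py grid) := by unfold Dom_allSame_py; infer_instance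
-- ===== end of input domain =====

-- B replaces A's flag-carrying early-exit loop by a divide-and-conquer recursion over
-- the row index range combining (has0, has1) pairs (objective: alternative).

-- ===== PORT A =====
-- the for-loop of _allSame: rows processed in order, carrying the two flags, early return False
def allSame_py_loop (rows : List (List Int)) (hasTrue hasFalse : Bool) : Bool :=
  match rows with
  | [] => true
  | row :: rest =>
    let hasTrue' := if row.contains 1 then true else hasTrue
    let hasFalse' := if row.contains 0 then true else hasFalse
    if hasTrue' && hasFalse' then false
    else allSame_py_loop rest hasTrue' hasFalse'

def allSame_py (grid : List (List Int)) : Bool :=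
  allSame_py_loop grid false false

-- ===== PORT B =====
-- B's inner scan(lo, hi): (has0, has1) over rows lo..hi-1 by divide and conquer.
-- The guard is `hi ≤ lo + 1` instead of Python's `hi - lo == 1` only to make the
-- recursion total; every actual call has lo < hi, where the two coincide.
def allSame_py_alt_scan (grid : List (List Int)) (lo hi : Nat) : Bool × Bool :=
  if hi ≤ lo + 1 then
    let row := grid.getD lo []
    (row.contains 0, row.contains 1)
  else
    let mid := (lo + hi) / 2
    let a := allSame_py_alt_scan grid lo mid
    let b := allSame_py_alt_scan grid mid hi
    (a.1 || b.1, a.2 || b.2)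
termination_by hi - lo
decreasing_by all_goals omega

def allSame_py_alt (grid : List (List Int)) : Bool :=
  if grid.isEmpty then true
  else
    let h := allSame_py_alt_scan grid 0 grid.length
    !(h.1 && h.2)

-- ===== PRECONDITION & SPEC =====
def Spec_allSame_py (grid : List (List Int)) (out : Bool) : Prop := out = allSame_py_alt grid
instance (grid : List (List Int)) (out : Bool) : Decidable (Spec_allSame_py grid out) := by unfold Spec_allSame_py; infer_instance

-- ===== CLAIM (what is proved, stated in full; the proofs are below) =====
def Claim_equal_allSame_py : Prop := ∀ (grid : List (List Int)), Dom_allSame_py grid → Spec_allSame_py grid (allSame_py grid)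

-- ===== LEMMAS AND PROOFS =====
-- A's loop computes: true iff NOT (a 1 has been seen (flag or some row) AND a 0 has been seen)
theorem allSame_py_loop_char (rows : List (List Int)) (hT hF : Bool)
    (hflags : (hT && hF) = false) :
    allSame_py_loop rows hT hF
      = !((hT || rows.any (fun r => r.contains 1)) && (hF || rows.any (fun r => r.contains 0))) := by
  induction rows generalizing hT hF with
  | nil => simp [allSame_py_loop]; cases hT <;> simp_all
  | cons row rest ih =>
    simp only [allSame_py_loop, List.any_cons]
    split_ifs with h1 h0 hb hb hb hb <;>
      cases hT <;> cases hF <;> simp_all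

-- B's scan computes the (has0, has1) pair of the slice grid[lo:hi]
theorem allSame_py_alt_scan_char (grid : List (List Int)) :
    ∀ (n lo hi : Nat), hi - lo ≤ n → lo < hi →
    allSame_py_alt_scan grid lo hi
      = (((grid.drop lo).take (hi - lo)).any (fun r => r.contains 0),
         ((grid.drop lo).take (hi - lo)).any (fun r => r.contains 1)) := by
  intro n
  induction n with
  | zero => intro lo hi h1 h2; omega
  | succ n ih =>
    intro lo hi hle hlt
    rw [allSame_py_alt_scan]
    by_cases hbase : hi ≤ lo + 1
    · have hhi : hi = lo + 1 := by omega
      subst hhi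
      simp only [if_pos (by omega : lo + 1 ≤ lo + 1)]
      have h1 : lo + 1 - lo = 1 := by omega
      by_cases hlen : lo < grid.length
      · have h' : grid.drop lo = grid[lo] :: grid.drop (lo + 1) :=
          List.drop_eq_getElem_cons hlen
        have hg : grid.getD lo [] = grid[lo] := by
          simp [List.getD, List.getElem?_eq_getElem hlen]
        rw [h1, hg, h', List.take_succ_cons, List.take_zero]
        simp [List.any_cons, List.any_nil]
      · have h0 : grid.drop lo = [] := List.drop_eq_nil_of_le (by omega)
        simp [h1, h0, List.getD,
          List.getElem?_eq_none (show grid.length ≤ lo by omega)]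
    · rw [if_neg hbase]
      dsimp only
      have hmid1 : lo < (lo + hi) / 2 := by omega
      have hmid2 : (lo + hi) / 2 < hi := by omega
      rw [ih lo ((lo + hi) / 2) (by omega) hmid1,
          ih ((lo + hi) / 2) hi (by omega) hmid2]
      have hsplit : (grid.drop lo).take (hi - lo)
          = (grid.drop lo).take ((lo + hi) / 2 - lo)
            ++ (grid.drop ((lo + hi) / 2)).take (hi - (lo + hi) / 2) := by
        have h1 : hi - lo = ((lo + hi) / 2 - lo) + (hi - (lo + hi) / 2) := by omega
        rw [h1, List.take_add, List.drop_drop]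
        have h2 : lo + ((lo + hi) / 2 - lo) = (lo + hi) / 2 := by omega
        rw [h2]
      rw [hsplit]
      simp [List.any_append]

-- ===== VERDICT (by name: the statement is the Claim_ definition above) =====
theorem allSame_py_spec : Claim_equal_allSame_py := by
  intro grid _
  unfold Spec_allSame_py allSame_py allSame_py_alt
  rw [allSame_py_loop_char _ _ _ rfl]
  by_cases hemp : grid.isEmpty
  · have : grid = [] := List.isEmpty_iff.mp hemp
    subst this; simp
  · rw [if_neg hemp]
    have hne : 0 < grid.length := by
      cases grid with
      | nil => simp at hemp
      | cons a l => simp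
    rw [allSame_py_alt_scan_char grid grid.length 0 grid.length (by omega) hne]
    simp [Bool.and_comm]
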